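-- pv_equiv track=rewrite | github.com/vismit2000/compCode-II | Advent-of-Code/2024/day07.py | check_equation_true
-- ===== SOURCE A (Python) =====
-- def check_equation_true(eq, k):
--     total_ops = len(eq) - 2
--     for i in range(k**total_ops):
--         value = eq[1]
--         temp = i
--         for j in range(total_ops):
--             op = temp % k
--             temp //= k
--             if op == 0:
--                 value += eq[j + 2]
--             elif op == 1:
--                 value *= eq[j + 2]
--             elif op == 2:
--                 value = int(str(value) + str(eq[j + 2]))
--             if value > eq[0]:
--                 break
--         if value == eq[0]:
--             return True
--     return False
-- ===== SOURCE B (Python) =====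
-- def check_equation_true(eq, k):
--     # Forward sweep keeping the set of distinct intermediate values, pruned to
--     # <= target; k selects how many of the three operators (+, *, concat) are
--     # in play.
--     target = eq[0]
--     ops = [lambda v, x: v + x,
--            lambda v, x: v * x,
--            lambda v, x: int(str(v) + str(x))][:k]
--     vals = {eq[1]}
--     for x in eq[2:]:
--         vals = {w for v in vals for w in (op(v, x) for op in ops) if w <= target}
--     return target in vals
-- ===== Notes on version B (the rewrite author's own statement) =====
-- stated objective: alternative
-- what changed: A enumerates all k**(n-2) operator strings by base-k digit decoding and re-evaluates each from scratch; B makes one forward pass over the operands maintaining the set of distinct intermediate values pruned to <= target; Pre_ keeps the natural domain (target plus operands, 1 <= k <= 3 unless there are no operator slots, nonnegative operands when concat is enabled): for k <= 0 and k >= 4 A's value is an accident of range()/base-k decoding falling through the three operator branches, and with k = 3 and negative operands the str-concatenation raises ValueError on most inputs.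
-- outside the precondition, e.g. on check_equation_true([3, 1, 2], -2): A returns False, B returns True; on check_equation_true([1, 1, 5], 4): A returns True, B returns False; on check_equation_true([-1, 1, -2], 3): A returns True, B raises ValueError
import Mathlib
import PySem

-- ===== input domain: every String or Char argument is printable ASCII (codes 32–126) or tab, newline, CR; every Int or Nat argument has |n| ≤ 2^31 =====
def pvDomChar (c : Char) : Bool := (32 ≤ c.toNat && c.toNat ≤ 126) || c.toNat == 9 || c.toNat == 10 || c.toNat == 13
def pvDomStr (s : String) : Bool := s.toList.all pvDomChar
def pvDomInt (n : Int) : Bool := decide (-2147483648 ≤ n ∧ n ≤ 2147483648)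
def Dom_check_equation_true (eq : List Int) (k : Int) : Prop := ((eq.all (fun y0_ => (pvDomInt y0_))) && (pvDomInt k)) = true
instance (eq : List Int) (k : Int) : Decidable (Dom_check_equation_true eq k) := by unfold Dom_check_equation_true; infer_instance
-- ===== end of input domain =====

-- B replaces A's enumeration of all k^(n-2) operator strings by one forward sweep
-- over the operands keeping the set of distinct intermediate values (pruned to
-- ≤ target, as A's early break does); objective: alternative (one sweep over the
-- operands instead of enumeration of operator strings).

-- int(str(v) + str(x)), the concatenation operator both Pythons contain verbatim
def pvConcat (v x : Int) : Int :=
  (PySem.Int.ofStr? (PySem.Int.toStr v ++ PySem.Int.toStr x)).getD 0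

-- ===== PORT A =====
-- the inner 'for j in range(total_ops)' loop, over the list of j's, with state
-- (value, temp); the break returns the current (> eq[0]) value
def pvA_loop (eq : List Int) (k : Int) : List Int → Int → Int → Int
  | [], value, _ => value
  | j :: js, value, temp =>
    let op := PySem.Int.mod temp k
    let temp' := PySem.Int.floordiv temp k
    let value' :=
      if op = 0 then value + PySem.List.pyGetD eq (j + 2) 0
      else if op = 1 then value * PySem.List.pyGetD eq (j + 2) 0
      else if op = 2 then pvConcat value (PySem.List.pyGetD eq (j + 2) 0)
      else value
    if PySem.List.pyGetD eq 0 0 < value' then value'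
    else pvA_loop eq k js value' temp'

-- k ** total_ops: '.toNat' is exact under Pre_ (total_ops ≥ 0; Python raises otherwise)
def check_equation_true (eq : List Int) (k : Int) : Bool :=
  let total_ops : Int := (eq.length : Int) - 2
  (PySem.List.pyRange 0 (k ^ total_ops.toNat) 1).any fun i =>
    pvA_loop eq k (PySem.List.pyRange 0 total_ops 1) (PySem.List.pyGetD eq 1 0) i
      == PySem.List.pyGetD eq 0 0

-- ===== PORT B =====
-- the three operators; 'ops = [...][:k]' keeps the first k of them
def pvOpsList : List (Int → Int → Int) :=
  [fun v x => v + x, fun v x => v * x, fun v x => pvConcat v x]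

def check_equation_true_alt (eq : List Int) (k : Int) : Bool :=
  let target := PySem.List.pyGetD eq 0 0
  let ops := PySem.List.slice pvOpsList none (some k)
  let vals : PySem.Set Int := PySem.Set.ofList [PySem.List.pyGetD eq 1 0]
  let final := (PySem.List.slice eq (some 2) none).foldl
    (fun vals x => PySem.Set.ofList
      ((vals.flatMap (fun v => ops.map (fun op => op v x))).filter
        (fun w => decide (w ≤ target)))) vals
  PySem.Set.contains final target

-- ===== PRECONDITION & SPEC =====
-- Pre_ keeps the natural domain of the puzzle: a target plus at least one operand
-- (A raises IndexError on shorter input) and, unless there are no operator slots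
-- at all (len = 2), an operator count 1 ≤ k ≤ 3 naming a nonempty prefix of the
-- three operators (for k ≤ 0 and k ≥ 4 A's value is an accident of range()/base-k
-- decoding falling through the three operator branches), with nonnegative operands
-- when k = 3 (A's str-concatenation raises ValueError on most negative operands,
-- and B evaluates it on every pair).
def Pre_check_equation_true (eq : List Int) (k : Int) : Prop :=
  2 ≤ eq.length ∧
    (eq.length = 2 ∨ (1 ≤ k ∧ k ≤ 3 ∧ (k = 3 → ∀ x ∈ eq.drop 2, 0 ≤ x)))
instance (eq : List Int) (k : Int) : Decidable (Pre_check_equation_true eq k) := by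
  unfold Pre_check_equation_true; infer_instance

def pvWitness_check_equation_true : List Int × Int := ([6, 2, 3], 2)

def Spec_check_equation_true (eq : List Int) (k : Int) (out : Bool) : Prop := out = check_equation_true_alt eq k
instance (eq : List Int) (k : Int) (out : Bool) : Decidable (Spec_check_equation_true eq k out) := by unfold Spec_check_equation_true; infer_instance

-- ===== CLAIM (what is proved, stated in full; the proofs are below) =====
def Claim_equal_check_equation_true : Prop := ∀ (eq : List Int) (k : Int), Dom_check_equation_true eq k → Pre_check_equation_true eq k → Spec_check_equation_true eq k (check_equation_true eq k)

-- ===== LEMMAS AND PROOFS =====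

-- applying operator number 'op' (0 = +, 1 = ×, 2 = concat, anything else: identity)
def pvApplyOp (op v x : Int) : Int :=
  if op = 0 then v + x
  else if op = 1 then v * x
  else if op = 2 then pvConcat v x
  else v

-- A's inner loop as a recursion over the operand list itself
def pvEval (k T : Int) : Int → Int → List Int → Int
  | v, _, [] => v
  | v, temp, x :: xs =>
    let v' := pvApplyOp (PySem.Int.mod temp k) v x
    if T < v' then v' else pvEval k T v' (PySem.Int.floordiv temp k) xs

-- v is reachable from s through the operands xs with every intermediate result ≤ T
def pvReach (k T : Int) : Int → List Int → Int → Prop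
  | s, [], v => v = s
  | s, x :: xs, v =>
    ∃ op : Int, 0 ≤ op ∧ op < k ∧ pvApplyOp op s x ≤ T ∧ pvReach k T (pvApplyOp op s x) xs v

lemma pvA_loop_eq_eval (eq : List Int) (k : Int) :
    ∀ (n a : Nat) (v temp : Int), eq.length - (a + 2) = n →
    pvA_loop eq k (PySem.List.pyRange (a : Int) ((eq.length : Int) - 2) 1) v temp
      = pvEval k (PySem.List.pyGetD eq 0 0) v temp (eq.drop (a + 2)) := by
  intro n
  induction n with
  | zero =>
    intro a v temp h
    rw [PySem.List.pyRange_one_eq_nil (by omega),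
      List.drop_eq_nil_of_le (by omega)]
    rfl
  | succ n ih =>
    intro a v temp h
    have hlt : a + 2 < eq.length := by omega
    rw [PySem.List.pyRange_one_cons (by omega),
      List.drop_eq_getElem_cons hlt]
    have hget : PySem.List.pyGetD eq ((a : Int) + 2) 0 = eq[a + 2] := by
      have hc : ((a : Int) + 2) = ((a + 2 : Nat) : Int) := by push_cast; ring
      rw [hc, PySem.List.pyGetD_natCast]
      exact List.getD_eq_getElem eq 0 hlt
    simp only [pvA_loop, pvEval, pvApplyOp, hget]
    have hstep : ((a : Int) + 1) = ((a + 1 : Nat) : Int) := by push_cast; ring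
    rw [hstep]
    have hrec : ∀ V t', pvA_loop eq k (PySem.List.pyRange ((a + 1 : Nat) : Int) ((eq.length : Int) - 2) 1) V t'
        = pvEval k (PySem.List.pyGetD eq 0 0) V t' (eq.drop (a + 2 + 1)) := by
      intro V t'
      have hh := ih (a + 1) V t' (by omega)
      rwa [show a + 1 + 2 = a + 2 + 1 from by omega] at hh
    simp only [hrec]

lemma pvEval_reach (k T : Int) (hk : 1 ≤ k) (xs : List Int) :
    ∀ s : Int, (∃ i : Int, 0 ≤ i ∧ i < k ^ xs.length ∧ pvEval k T s i xs = T)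
      ↔ pvReach k T s xs T := by
  have hk0 : (0 : Int) < k := by omega
  induction xs with
  | nil =>
    intro s
    simp only [pvEval, pvReach, List.length_nil, pow_zero]
    constructor
    · rintro ⟨i, _, _, rfl⟩; rfl
    · rintro rfl; exact ⟨0, le_refl _, by omega, rfl⟩
  | cons x xs ih =>
    intro s
    have hpow : (0 : Int) < k ^ xs.length := pow_pos hk0 _
    constructor
    · rintro ⟨i, hi0, hilt, heq⟩
      have hmod : PySem.Int.mod i k = i % k := PySem.Int.mod_eq_emod_of_pos hk0
      have hdiv : PySem.Int.floordiv i k = i / k := PySem.Int.floordiv_eq_ediv_of_pos hk0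
      simp only [pvEval, hmod, hdiv] at heq
      by_cases hb : T < pvApplyOp (i % k) s x
      · rw [if_pos hb] at heq; omega
      · rw [if_neg hb] at heq
        refine ⟨i % k, Int.emod_nonneg i (by omega), Int.emod_lt_of_pos i hk0, not_lt.mp hb, ?_⟩
        refine (ih _).mp ⟨i / k, Int.ediv_nonneg hi0 (le_of_lt hk0), ?_, heq⟩
        have : i < k ^ xs.length * k := by
          rw [← pow_succ]; simpa using hilt
        exact Int.ediv_lt_of_lt_mul hk0 this
    · rintro ⟨op, hop0, hoplt, hle, hreach⟩
      obtain ⟨i', hi'0, hi'lt, heval⟩ := (ih _).mpr hreach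
      refine ⟨op + k * i', by positivity, ?_, ?_⟩
      · have h1 : op + k * i' < k * (i' + 1) := by ring_nf; omega
        have h2 : k * (i' + 1) ≤ k * k ^ xs.length := by
          apply mul_le_mul_of_nonneg_left (by omega) (by omega)
        calc op + k * i' < k * (i' + 1) := h1
          _ ≤ k * k ^ xs.length := h2
          _ = k ^ (x :: xs).length := by rw [List.length_cons, pow_succ]; ring
      · have hmod : PySem.Int.mod (op + k * i') k = op := by
          rw [PySem.Int.mod_eq_emod_of_pos hk0, Int.add_mul_emod_self_left,
            Int.emod_eq_of_lt hop0 hoplt]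
        have hdiv : PySem.Int.floordiv (op + k * i') k = i' := by
          rw [PySem.Int.floordiv_eq_ediv_of_pos hk0, Int.add_mul_ediv_left _ _ (by omega : k ≠ 0),
            Int.ediv_eq_zero_of_lt hop0 hoplt]
          ring
        simp only [pvEval, hmod, hdiv, if_neg (not_lt.mpr hle)]
        exact heval

-- the first k operators, applied to (v, x), are exactly pvApplyOp op v x for 0 ≤ op < k
lemma pvOps_mem (k v x w : Int) (h1 : 1 ≤ k) (h3 : k ≤ 3) :
    w ∈ (PySem.List.slice pvOpsList none (some k)).map (fun op => op v x) ↔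
      ∃ op : Int, 0 ≤ op ∧ op < k ∧ w = pvApplyOp op v x := by
  rw [PySem.List.slice_to _ (by omega : (0:Int) ≤ k)]
  interval_cases k
  · show w ∈ [v + x] ↔ _
    simp only [List.mem_singleton]
    constructor
    · rintro rfl; exact ⟨0, by omega, by omega, by simp [pvApplyOp]⟩
    · rintro ⟨op, h0, hlt, rfl⟩
      have : op = 0 := by omega
      subst this; simp [pvApplyOp]
  · show w ∈ [v + x, v * x] ↔ _
    simp only [List.mem_cons, List.not_mem_nil, or_false]
    constructor
    · rintro (rfl | rfl)
      · exact ⟨0, by omega, by omega, by simp [pvApplyOp]⟩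
      · exact ⟨1, by omega, by omega, by simp [pvApplyOp]⟩
    · rintro ⟨op, h0, hlt, rfl⟩
      rcases (by omega : op = 0 ∨ op = 1) with rfl | rfl <;> simp [pvApplyOp]
  · show w ∈ [v + x, v * x, pvConcat v x] ↔ _
    simp only [List.mem_cons, List.not_mem_nil, or_false]
    constructor
    · rintro (rfl | rfl | rfl)
      · exact ⟨0, by omega, by omega, by simp [pvApplyOp]⟩
      · exact ⟨1, by omega, by omega, by simp [pvApplyOp]⟩
      · exact ⟨2, by omega, by omega, by simp [pvApplyOp]⟩
    · rintro ⟨op, h0, hlt, rfl⟩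
      rcases (by omega : op = 0 ∨ op = 1 ∨ op = 2) with rfl | rfl | rfl <;> simp [pvApplyOp]

-- one step of B's sweep: the pruned children of vals under operand x
lemma pvStep_mem (k T x : Int) (h1 : 1 ≤ k) (h3 : k ≤ 3) (vals : List Int) (w : Int) :
    w ∈ PySem.Set.ofList
        ((vals.flatMap (fun v => (PySem.List.slice pvOpsList none (some k)).map (fun op => op v x))).filter
          (fun w => decide (w ≤ T))) ↔
      ∃ v ∈ vals, ∃ op : Int, 0 ≤ op ∧ op < k ∧ pvApplyOp op v x ≤ T ∧ w = pvApplyOp op v x := by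
  rw [PySem.Set.mem_ofList, List.mem_filter, List.mem_flatMap]
  constructor
  · rintro ⟨⟨v, hv, hmem⟩, hle⟩
    obtain ⟨op, h0, hlt, rfl⟩ := (pvOps_mem k v x w h1 h3).mp hmem
    exact ⟨v, hv, op, h0, hlt, by simpa using hle, rfl⟩
  · rintro ⟨v, hv, op, h0, hlt, hle, rfl⟩
    exact ⟨⟨v, hv, (pvOps_mem k v x _ h1 h3).mpr ⟨op, h0, hlt, rfl⟩⟩, by simpa using hle⟩

lemma pvFold_mem (k T : Int) (h1 : 1 ≤ k) (h3 : k ≤ 3) (xs : List Int) :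
    ∀ (vals : List Int) (w : Int),
      w ∈ xs.foldl (fun vals x =>
          PySem.Set.ofList
            ((vals.flatMap (fun v => (PySem.List.slice pvOpsList none (some k)).map (fun op => op v x))).filter
              (fun w => decide (w ≤ T)))) vals
        ↔ ∃ u ∈ vals, pvReach k T u xs w := by
  induction xs with
  | nil =>
    intro vals w
    simp [pvReach]
  | cons x xs ih =>
    intro vals w
    rw [List.foldl_cons, ih]
    constructor
    · rintro ⟨u', hu', hreach⟩
      obtain ⟨v, hv, op, h0, hlt, hle, rfl⟩ := (pvStep_mem k T x h1 h3 vals u').mp hu'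
      exact ⟨v, hv, op, h0, hlt, hle, hreach⟩
    · rintro ⟨u, hu, op, hop0, hoplt, hle, hreach⟩
      refine ⟨pvApplyOp op u x, ?_, hreach⟩
      exact (pvStep_mem k T x h1 h3 vals _).mpr ⟨u, hu, op, hop0, hoplt, hle, rfl⟩

theorem pvMain (eq : List Int) (k : Int) (hpre : Pre_check_equation_true eq k) :
    check_equation_true eq k = check_equation_true_alt eq k := by
  obtain ⟨hlen, hcase⟩ := hpre
  rw [Bool.eq_iff_iff]
  unfold check_equation_true check_equation_true_alt
  simp only
  have hdrop : PySem.List.slice eq (some 2) none = eq.drop 2 := by simp [pysem]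
  rw [hdrop]
  have hcontains : ∀ (s : PySem.Set Int) (y : Int),
      PySem.Set.contains s y = true ↔ y ∈ s := by
    intro s y; simp [PySem.Set.contains]
  have hinit : PySem.Set.ofList [PySem.List.pyGetD eq 1 0]
      = [PySem.List.pyGetD eq 1 0] := rfl
  rw [hcontains, hinit]
  set T := PySem.List.pyGetD eq 0 0 with hT
  set s := PySem.List.pyGetD eq 1 0 with hs
  rcases hcase with h2 | ⟨hk1, hk3, -⟩
  · have hd : eq.drop 2 = [] := List.drop_eq_nil_of_le (by omega)
    have ht0 : ((eq.length : Int) - 2) = 0 := by rw [h2]; norm_num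
    rw [hd, ht0]
    norm_num
    constructor
    · rintro ⟨x, -, h⟩
      exact h.symm
    · intro h
      exact ⟨0, ⟨le_refl _, by norm_num⟩, h.symm⟩
  · have htn : ((eq.length : Int) - 2).toNat = eq.length - 2 := by omega
    have hlen2 : (eq.drop 2).length = eq.length - 2 := by simp
    have hA : ∀ i : Int,
        pvA_loop eq k (PySem.List.pyRange 0 ((eq.length : Int) - 2) 1) s i
          = pvEval k T s i (eq.drop 2) := by
      intro i
      have h := pvA_loop_eq_eval eq k (eq.length - 2) 0 s i (by omega)
      simpa using h
    rw [List.any_eq_true]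
    constructor
    · rintro ⟨i, hi, hval⟩
      rw [PySem.List.mem_pyRange_one] at hi
      rw [beq_iff_eq, hA i] at hval
      have hre : pvReach k T s (eq.drop 2) T :=
        (pvEval_reach k T hk1 _ s).mp ⟨i, hi.1, by rw [hlen2, ← htn]; exact hi.2, hval⟩
      exact (pvFold_mem k T hk1 hk3 _ [s] T).mpr ⟨s, by simp, hre⟩
    · intro hmem
      obtain ⟨u, hu, hre⟩ := (pvFold_mem k T hk1 hk3 _ [s] T).mp hmem
      rw [List.mem_singleton] at hu
      subst hu
      obtain ⟨i, hi0, hilt, hval⟩ := (pvEval_reach k T hk1 _ s).mpr hre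
      rw [hlen2] at hilt
      refine ⟨i, ?_, ?_⟩
      · rw [PySem.List.mem_pyRange_one, htn]; exact ⟨hi0, hilt⟩
      · rw [beq_iff_eq, hA i]; exact hval

-- ===== VERDICT (by name: the statement is the Claim_ definition above) =====
theorem check_equation_true_spec : Claim_equal_check_equation_true := by
  intro eq k _ hpre
  exact pvMain eq k hpre
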